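-- pv_equiv track=rewrite | github.com/shubhamlokhande2147/Wipro-Assignment | Day_5/Reverse_string.py | Test
-- ===== SOURCE A (Python) =====
-- def Test(message):
--     words = message.split()
--     encrypted_message = []
--     for i, word in enumerate(words, 1):
--         if i % 2 != 0:
--             encrypted_message.append(word[::-1])
--         else:
--             consonants = ''.join([c for c in word if c.lower() not in 'aeiou'])
--             vowels = ''.join([c for c in word if c.lower() in 'aeiou'])
--             encrypted_message.append(consonants + vowels)
--     return ' '.join(encrypted_message)
-- ===== SOURCE B (Python) =====
-- def Test(message):
--     def scramble(i, w):
--         if i % 2 == 0: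
--             return w[::-1]
--         return ''.join(sorted(w, key=lambda c: c.lower() in 'aeiou'))
--     return ' '.join(scramble(i, w) for i, w in enumerate(message.split()))
-- ===== Notes on version B (the rewrite author's own statement) =====
-- stated objective: idiomatic
-- what changed: Even-position words are rearranged by one stable sort keyed on vowelness (consonants=False first) instead of two separate filter comprehensions, and the append-accumulator loop becomes a join over a generator with 0-based enumerate.
import Mathlib
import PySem

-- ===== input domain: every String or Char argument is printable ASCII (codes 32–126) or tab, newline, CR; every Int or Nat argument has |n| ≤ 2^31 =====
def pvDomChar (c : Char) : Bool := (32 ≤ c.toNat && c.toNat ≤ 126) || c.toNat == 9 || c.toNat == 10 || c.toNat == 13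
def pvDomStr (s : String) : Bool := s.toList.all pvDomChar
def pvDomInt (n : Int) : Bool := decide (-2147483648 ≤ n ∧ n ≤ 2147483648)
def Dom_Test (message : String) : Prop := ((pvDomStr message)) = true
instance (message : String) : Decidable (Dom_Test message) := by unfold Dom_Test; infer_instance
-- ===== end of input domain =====

-- B replaces the two vowel/consonant filter passes by one stable sort keyed on vowelness and
-- the append loop by a join over a mapped 0-based enumerate (objective: idiomatic; return value only).

-- ===== PORT A =====
-- c.lower() in 'aeiou'
def pvVowel (c : Char) : Bool := "aeiou".toList.contains (PySem.Chars.lowerChar c)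

def Test (message : String) : String :=
  let words := PySem.Str.split₀ message
  let encrypted := (PySem.List.enumerate words 1).foldl (fun acc iw =>
    if PySem.Int.mod iw.1 2 ≠ 0 then
      acc ++ [(PySem.Str.slice? iw.2 none none (-1)).getD ""]   -- word[::-1]; step -1 ≠ 0, never none
    else
      let consonants := iw.2.toList.filter (fun c => !pvVowel c)
      let vowels := iw.2.toList.filter (fun c => pvVowel c)
      acc ++ [String.ofList (consonants ++ vowels)]) []
  PySem.Str.join " " encrypted

-- ===== PORT B =====
def Test_alt (message : String) : String :=
  PySem.Str.join " " ((PySem.List.enumerate (PySem.Str.split₀ message)).map (fun iw =>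
    if PySem.Int.mod iw.1 2 == 0 then (PySem.Str.slice? iw.2 none none (-1)).getD ""
    else String.ofList (PySem.List.sorted iw.2.toList pvVowel false)))

-- ===== PRECONDITION & SPEC =====
def Spec_Test (message : String) (out : String) : Prop := out = Test_alt message
instance (message : String) (out : String) : Decidable (Spec_Test message out) := by unfold Spec_Test; infer_instance

-- ===== CLAIM (what is proved, stated in full; the proofs are below) =====
def Claim_equal_Test : Prop := ∀ (message : String), Dom_Test message → Spec_Test message (Test message)

-- ===== LEMMAS AND PROOFS =====

-- Inserting x into a consonant-block ++ vowel-block list keeps the partition.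
theorem insertBy_partition {α : Type} (p : α → Bool) (x : α) (as bs : List α)
    (ha : ∀ a ∈ as, p a = false) (hb : ∀ b ∈ bs, p b = true) :
    PySem.List.insertBy (fun a b => decide (p a < p b)) x (as ++ bs) =
      if p x then as ++ bs ++ [x] else as ++ x :: bs := by
  induction as with
  | nil =>
    simp only [List.nil_append]
    induction bs with
    | nil => cases hpx : p x <;> simp [PySem.List.insertBy]
    | cons b bs ih =>
      have hpb : p b = true := hb b (by simp)
      cases hpx : p x with
      | false =>
        simp [PySem.List.insertBy, hpb, hpx]
      | true =>
        rw [PySem.List.insertBy]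
        simp only [hpb, hpx]
        rw [ih (fun y hy => hb y (by simp [hy]))]
        simp [hpx]
  | cons a as ih =>
    have hpa : p a = false := ha a (by simp)
    rw [List.cons_append, PySem.List.insertBy]
    have hlt : (decide (p x < p a)) = false := by simp [hpa, Bool.lt_iff]
    simp only [hlt, Bool.false_eq_true, if_false]
    rw [ih (fun y hy => ha y (by simp [hy]))]
    cases hpx : p x <;> simp

-- Stable sort by a Bool key is the partition: false-keyed elements first, then true, order kept.
theorem sorted_bool_partition {α : Type} (p : α → Bool) (cs : List α) :
    PySem.List.sorted cs p false = cs.filter (fun c => !p c) ++ cs.filter p := by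
  rw [PySem.List.sorted_eq_foldl_insertBy]
  suffices h : ∀ (cs : List α) (as bs : List α), (∀ a ∈ as, p a = false) → (∀ b ∈ bs, p b = true) →
      cs.foldl (fun acc x => PySem.List.insertBy (fun a b => decide (p a < p b)) x acc) (as ++ bs)
        = (as ++ cs.filter (fun c => !p c)) ++ (bs ++ cs.filter p) by
    simpa using h cs [] [] (by simp) (by simp)
  intro cs
  induction cs with
  | nil => intro as bs _ _; simp
  | cons x cs ih =>
    intro as bs ha hb
    simp only [List.foldl_cons]
    rw [insertBy_partition p x as bs ha hb]
    cases hpx : p x with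
    | false =>
      rw [if_neg (by simp)]
      have hcons : as ++ x :: bs = (as ++ [x]) ++ bs := by simp
      rw [hcons, ih (as ++ [x]) bs ?_ hb]
      · simp [hpx]
      · intro a hma
        rcases List.mem_append.1 hma with h | h
        · exact ha a h
        · simp at h; simpa [h] using hpx
    | true =>
      rw [if_pos rfl]
      have hcons : as ++ bs ++ [x] = as ++ (bs ++ [x]) := by simp
      rw [hcons, ih as (bs ++ [x]) ha ?_]
      · simp [hpx]
      · intro b hmb
        rcases List.mem_append.1 hmb with h | h
        · exact hb b h
        · simp at h; simpa [h] using hpx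

theorem fmod_two_eq (i : Int) : PySem.Int.mod i 2 = i % 2 := by
  unfold PySem.Int.mod
  rw [Int.fmod_eq_emod]
  norm_num

-- A's append loop is the map of its per-word transform.
theorem foldA_eq (l : List (Int × String)) (acc : List String) :
    l.foldl (fun acc iw =>
      if PySem.Int.mod iw.1 2 ≠ 0 then
        acc ++ [(PySem.Str.slice? iw.2 none none (-1)).getD ""]
      else
        acc ++ [String.ofList (iw.2.toList.filter (fun c => !pvVowel c) ++ iw.2.toList.filter (fun c => pvVowel c))]) acc
    = acc ++ l.map (fun iw =>
        if PySem.Int.mod iw.1 2 ≠ 0 then (PySem.Str.slice? iw.2 none none (-1)).getD ""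
        else String.ofList (iw.2.toList.filter (fun c => !pvVowel c) ++ iw.2.toList.filter (fun c => pvVowel c))) := by
  induction l generalizing acc with
  | nil => simp
  | cons x l ih => simp only [List.foldl_cons, List.map_cons]; split_ifs <;> rw [ih] <;> simp

-- The two enumerations (A from n+1, B from n) map to the same transformed words.
theorem enum_map_eq (ws : List String) : ∀ (n : Int),
    ((PySem.List.enumerate ws (n + 1)).map (fun iw =>
        if PySem.Int.mod iw.1 2 ≠ 0 then (PySem.Str.slice? iw.2 none none (-1)).getD ""
        else String.ofList (iw.2.toList.filter (fun c => !pvVowel c) ++ iw.2.toList.filter (fun c => pvVowel c))))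
    = ((PySem.List.enumerate ws n).map (fun iw =>
        if PySem.Int.mod iw.1 2 == 0 then (PySem.Str.slice? iw.2 none none (-1)).getD ""
        else String.ofList (PySem.List.sorted iw.2.toList pvVowel false))) := by
  induction ws with
  | nil => intro n; simp [PySem.List.enumerate_nil]
  | cons w ws ih =>
    intro n
    rw [PySem.List.enumerate_cons, PySem.List.enumerate_cons, List.map_cons, List.map_cons, ih (n + 1)]
    congr 1
    simp only [fmod_two_eq]
    by_cases h : (n + 1) % 2 = 0
    · rw [if_neg (by simpa using h), if_neg (by simp; omega), sorted_bool_partition]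
    · rw [if_pos (by simpa using h), if_pos (by simp; omega)]

-- ===== VERDICT (by name: the statement is the Claim_ definition above) =====
theorem Test_spec : Claim_equal_Test := by
  intro message _
  show Test message = Test_alt message
  unfold Test Test_alt
  simp only []
  rw [foldA_eq, List.nil_append]
  exact congrArg _ (by simpa using enum_map_eq (PySem.Str.split₀ message) 0)
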